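-- pv_equiv track=rewrite | github.com/ZiadAmerr/VeriLint | file.py | is_parallel
-- ===== SOURCE A (Python) =====
-- def is_parallel(freq, cases):
--     def base_4_to_dec(num):
--         dec = 0
--         W = []
--         for i in range(len(num)):
--             W.append(4**i)
--         num = [*num]
--         num.reverse()
--         for i, w in enumerate(W):
--             x = num[i]
--             if x == "X":
--                 x = 2
--             elif x == "Z":
--                 x = 3
--             else:
--                 x = int(x)
--             dec += x*w
--         return dec
--
--     for case in cases:
--         index = base_4_to_dec(case)
--         if freq[index] > 1:
--             return False
--     return True
-- ===== SOURCE B (Python) =====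
-- def is_parallel(freq, cases):
--     def base_4_to_dec(num):
--         dec = 0
--         for x in num:
--             if x == "X":
--                 d = 2
--             elif x == "Z":
--                 d = 3
--             else:
--                 d = int(x)
--             dec = dec * 4 + d
--         return dec
--
--     return not any(freq[base_4_to_dec(case)] > 1 for case in cases)
-- ===== Notes on version B (the rewrite author's own statement) =====
-- stated objective: simpler
-- what changed: base_4_to_dec is replaced by a single left-to-right Horner fold (dec = dec*4 + digit), dropping the weight list, the reverse and the per-position 4**i powers, and the outer early-return loop becomes 'not any(...)'.
import Mathlib
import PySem

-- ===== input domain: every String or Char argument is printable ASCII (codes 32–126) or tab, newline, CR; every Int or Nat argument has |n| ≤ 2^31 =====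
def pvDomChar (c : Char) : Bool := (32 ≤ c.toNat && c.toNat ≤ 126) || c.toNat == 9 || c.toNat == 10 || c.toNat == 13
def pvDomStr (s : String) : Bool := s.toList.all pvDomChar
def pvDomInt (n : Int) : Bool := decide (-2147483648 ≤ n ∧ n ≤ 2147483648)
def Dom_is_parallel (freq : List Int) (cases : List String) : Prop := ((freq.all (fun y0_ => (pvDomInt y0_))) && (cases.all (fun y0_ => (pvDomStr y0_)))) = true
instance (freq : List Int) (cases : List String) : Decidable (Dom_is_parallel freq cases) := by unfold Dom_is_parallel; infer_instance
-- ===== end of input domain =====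

-- B replaces A's weight-list + reverse + enumerate positional sum by a left-to-right Horner fold
-- and folds the outer early-return loop into a single `any`; objective: simpler, same result.
set_option maxRecDepth 4096


-- ===== PORT A =====
-- x == "X" → 2, x == "Z" → 3, else int(x); int(x) via PySem.Int.ofChars? (exact; the getD 0
-- default is only reached where Python raises ValueError, excluded by Pre_)
def digitA (x : Char) : Int :=
  if x = 'X' then 2 else if x = 'Z' then 3 else (PySem.Int.ofChars? [x]).getD 0

-- literal port of A's inner base_4_to_dec: build W = [4^0, 4^1, …], reverse num,
-- then for i, w in enumerate(W): dec += digit(num[i]) * w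
-- (num[i] via pyGetD: i < len(W) = len(num) always, so the ' ' default is never reached)
def base_4_to_dec_A (num : List Char) : Int :=
  let W : List Int := (List.range num.length).foldl (fun W i => W ++ [(4:Int)^i]) []
  let numR := num.reverse
  (PySem.List.enumerate W).foldl
    (fun dec iw => dec + digitA (PySem.List.pyGetD numR iw.1 ' ') * iw.2) 0

-- for case in cases: if freq[index] > 1: return False / return True
-- (freq[index] via pyGetD: in range under Pre_, where Python does not raise IndexError)
def loopA (freq : List Int) : List String → Bool
  | [] => true
  | case :: rest =>
      if PySem.List.pyGetD freq (base_4_to_dec_A case.toList) 0 > 1 then false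
      else loopA freq rest

def is_parallel (freq : List Int) (cases : List String) : Bool :=
  loopA freq cases

-- ===== PORT B =====
-- Horner's rule, left to right: dec = dec*4 + d, with the X/Z/int(x) mapping inline
def base_4_to_dec_B (num : List Char) : Int :=
  num.foldl (fun dec x =>
    dec * 4 + (if x = 'X' then 2 else if x = 'Z' then 3 else (PySem.Int.ofChars? [x]).getD 0)) 0

-- not any(freq[base_4_to_dec(case)] > 1 for case in cases)
def is_parallel_alt (freq : List Int) (cases : List String) : Bool :=
  !(cases.any (fun case =>
      PySem.List.pyGetD freq (base_4_to_dec_B case.toList) 0 > 1))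

-- ===== PRECONDITION & SPEC =====
-- the base-4 numeric value A assigns to a case string (needed only to state the index bound)
def pvIndexVal (num : List Char) : Int :=
  num.foldl (fun d x =>
    d * 4 + (if x = 'X' then 2 else if x = 'Z' then 3 else (PySem.Int.ofChars? [x]).getD 0)) 0

-- pvWf: the case raises no ValueError/IndexError; pvHit: A's freq[index] > 1 early-exit test
def pvWf (freq : List Int) (case : String) : Bool :=
  case.toList.all (fun x => x == 'X' || x == 'Z' || (PySem.Int.ofChars? [x]).isSome)
  && decide (pvIndexVal case.toList < (freq.length : Int))

def pvHit (freq : List Int) (case : String) : Bool :=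
  freq.getD (pvIndexVal case.toList).toNat 0 > 1

-- Pre_ = exactly the inputs on which Python A returns: scanning cases in order, A raises
-- (ValueError on a character other than 'X'/'Z'/one int() accepts, or IndexError on an index
-- ≥ len(freq)) iff the first case that is not (well-formed and hit-free) is itself malformed;
-- a well-formed hit there means A returns False without looking further.
def Pre_is_parallel (freq : List Int) (cases : List String) : Prop :=
  (match cases.dropWhile (fun case => pvWf freq case && !pvHit freq case) with
   | [] => true
   | case :: _ => pvWf freq case) = true

instance (freq : List Int) (cases : List String) : Decidable (Pre_is_parallel freq cases) := by
  unfold Pre_is_parallel; infer_instance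

def pvWitness_is_parallel : List Int × List String := ([1, 0, 1, 0], ["X", "Z", "2"])

def Spec_is_parallel (freq : List Int) (cases : List String) (out : Bool) : Prop :=
  out = is_parallel_alt freq cases
instance (freq : List Int) (cases : List String) (out : Bool) : Decidable (Spec_is_parallel freq cases out) := by
  unfold Spec_is_parallel; infer_instance

-- ===== CLAIM (what is proved, stated in full; the proofs are below) =====
def Claim_equal_is_parallel : Prop := ∀ (freq : List Int) (cases : List String), Dom_is_parallel freq cases → Pre_is_parallel freq cases → Spec_is_parallel freq cases (is_parallel freq cases)

-- ===== LEMMAS AND PROOFS =====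

-- Horner fold with a generalized accumulator
theorem base4B_init (s : List Char) : ∀ (a : Int),
    s.foldl (fun dec x => dec * 4 + digitA x) a
      = a * 4 ^ s.length + s.foldl (fun dec x => dec * 4 + digitA x) 0 := by
  induction s with
  | nil => intro a; simp
  | cons c s ih =>
      intro a
      rw [List.foldl_cons, List.foldl_cons, ih (a * 4 + digitA c), ih (0 * 4 + digitA c),
        List.length_cons]
      ring

theorem base4B_cons (c : Char) (s : List Char) :
    base_4_to_dec_B (c :: s) = digitA c * 4 ^ s.length + base_4_to_dec_B s := by
  show List.foldl _ _ _ = _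
  rw [List.foldl_cons]
  show List.foldl (fun dec x => dec * 4 + digitA x) (0 * 4 + digitA c) s = _
  rw [base4B_init s (0 * 4 + digitA c)]
  show _ = digitA c * 4 ^ s.length + List.foldl (fun dec x => dec * 4 + digitA x) 0 s
  ring

-- the A-side positional sum, peeled at the front of num
theorem base4A_cons (c : Char) (s : List Char) :
    base_4_to_dec_A (c :: s) = base_4_to_dec_A s + digitA c * 4 ^ s.length := by
  simp only [base_4_to_dec_A, PySem.List.foldl_append_singleton_eq_map, List.nil_append,
    PySem.List.foldl_add, zero_add, List.length_cons, List.reverse_cons]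
  rw [List.range_succ, List.map_append, PySem.List.enumerate_append]
  simp only [List.map_append, List.sum_append, List.length_map, List.length_range,
    PySem.List.enumerate_cons, PySem.List.enumerate_nil, List.map_cons, List.map_nil,
    List.sum_cons, List.sum_nil, zero_add, add_zero]
  have h1 : ∀ iw ∈ PySem.List.enumerate ((List.range s.length).map fun i => (4:Int)^i) 0,
      digitA (PySem.List.pyGetD (s.reverse ++ [c]) iw.1 ' ') * iw.2
        = digitA (PySem.List.pyGetD s.reverse iw.1 ' ') * iw.2 := by
    intro iw hiw
    rcases (PySem.List.mem_enumerate_iff _ _ _).1 hiw with ⟨k, hk, rfl⟩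
    simp only [zero_add, PySem.List.pyGetD_natCast]
    rw [List.getD_append]
    simpa using hk
  rw [List.map_congr_left h1]
  have h2 : PySem.List.pyGetD (s.reverse ++ [c]) ((s.length : Int)) ' ' = c := by
    rw [PySem.List.pyGetD_natCast]
    have hlen : s.length = s.reverse.length := (List.length_reverse).symm
    rw [List.getD_eq_getElem?_getD, hlen, List.getElem?_concat_length]
    rfl
  rw [h2]

theorem base4_eq (num : List Char) : base_4_to_dec_A num = base_4_to_dec_B num := by
  induction num with
  | nil => rfl
  | cons c s ih =>
      rw [base4A_cons, base4B_cons, ih]; ring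

theorem loopA_eq_any (freq : List Int) (cases : List String) :
    loopA freq cases
      = !(cases.any (fun case =>
          PySem.List.pyGetD freq (base_4_to_dec_B case.toList) 0 > 1)) := by
  induction cases with
  | nil => rfl
  | cons case rest ih =>
      simp only [loopA, List.any_cons, base4_eq]
      by_cases h : PySem.List.pyGetD freq (base_4_to_dec_B case.toList) 0 > 1 <;>
        simp [h, ih]

-- ===== VERDICT (by name: the statement is the Claim_ definition above) =====
theorem is_parallel_spec : Claim_equal_is_parallel := by
  intro freq cases _ _
  unfold Spec_is_parallel is_parallel is_parallel_alt
  exact loopA_eq_any freq cases
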